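-- pv_equiv track=rewrite | github.com/Leewuc/codetree-TILs | 240409/미는 횟수/number-of-pushes.py | min_shift
-- ===== SOURCE A (Python) =====
-- def min_shift(a, b):
--     if a == b:
--         return 0
--
--     n = len(a)
--     for i in range(1, n):
--         if a[-i:] + a[:-i] == b:
--             return i
--     return -1
-- ===== SOURCE B (Python) =====
-- def min_shift(a, b):
--     if a == b:
--         return 0
--     n = len(a)
--     if len(b) != n or n == 0:
--         return -1
--     return (b + b).find(a, 1, 2 * n - 1)
-- ===== Notes on version B (the rewrite author's own statement) =====
-- stated objective: faster
-- what changed: Instead of building and comparing every rotation a[-i:]+a[:-i] of a against b (quadratic), B does one bounded substring search of a inside b+b - the first match position in [1, n-1] is exactly the minimal shift.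
import Mathlib
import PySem

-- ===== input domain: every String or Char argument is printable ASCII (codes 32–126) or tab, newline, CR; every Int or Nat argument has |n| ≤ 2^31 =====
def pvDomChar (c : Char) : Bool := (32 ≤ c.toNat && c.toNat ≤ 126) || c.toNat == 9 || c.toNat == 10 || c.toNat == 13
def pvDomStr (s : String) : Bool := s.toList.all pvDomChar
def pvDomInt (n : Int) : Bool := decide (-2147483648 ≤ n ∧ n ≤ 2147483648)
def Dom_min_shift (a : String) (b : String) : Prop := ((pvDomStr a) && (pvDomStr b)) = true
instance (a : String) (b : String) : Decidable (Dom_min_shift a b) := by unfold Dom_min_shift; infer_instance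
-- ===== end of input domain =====

-- B replaces A's quadratic scan over all rotations by one bounded substring search
-- of a inside b+b (the match position is the shift); proved equal on all inputs.

-- ===== PORT A =====
-- the loop `for i in range(1, n): if a[-i:] + a[:-i] == b: return i` / `return -1`
def minShiftGo (al bl : List Char) : List Int → Int
  | [] => -1
  | i :: rest =>
    if PySem.List.slice al (some (-i)) none ++ PySem.List.slice al none (some (-i)) = bl
    then i else minShiftGo al bl rest

def min_shift (a : String) (b : String) : Int :=
  if a.toList = b.toList then 0
  else minShiftGo a.toList b.toList (PySem.List.pyRange 1 (a.toList.length : Int) 1)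

-- ===== PORT B =====
-- Source B: `return (b + b).find(a, 1, 2 * n - 1)` after the trivial cases
def min_shift_alt (a : String) (b : String) : Int :=
  if a.toList = b.toList then 0
  else
    if b.toList.length ≠ a.toList.length ∨ a.toList.length = 0 then -1
    else PySem.Chars.findFrom (b.toList ++ b.toList) a.toList 1
           (some (2 * (a.toList.length : Int) - 1))

-- ===== PRECONDITION & SPEC =====
def Spec_min_shift (a : String) (b : String) (out : Int) : Prop := out = min_shift_alt a b
instance (a : String) (b : String) (out : Int) : Decidable (Spec_min_shift a b out) := by unfold Spec_min_shift; infer_instance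

-- ===== CLAIM (what is proved, stated in full; the proofs are below) =====
def Claim_equal_min_shift : Prop := ∀ (a : String) (b : String), Dom_min_shift a b → Spec_min_shift a b (min_shift a b)

-- ===== LEMMAS AND PROOFS =====

lemma pyRange_one_nil {a b : ℤ} (h : b ≤ a) : PySem.List.pyRange a b 1 = [] := by
  simp [PySem.List.pyRange, show ¬ a < b from not_lt.mpr h]

-- A's loop returns -1 when no index in [k, n) passes the test
lemma go_none (al bl : List Char) :
    ∀ (m : ℕ) (k n : ℤ), n - k ≤ (m : ℤ) →
    (∀ i : ℤ, k ≤ i → i < n →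
      PySem.List.slice al (some (-i)) none ++ PySem.List.slice al none (some (-i)) ≠ bl) →
    minShiftGo al bl (PySem.List.pyRange k n 1) = -1 := by
  intro m
  induction m with
  | zero => intro k n hm h; rw [pyRange_one_nil (by omega)]; rfl
  | succ m ih =>
    intro k n hm h
    by_cases hkn : k < n
    · rw [PySem.List.pyRange_one_cons hkn]
      simp only [minShiftGo]
      rw [if_neg (h k le_rfl hkn)]
      exact ih (k+1) n (by omega) (fun i h1 h2 => h i (by omega) h2)
    · rw [pyRange_one_nil (by omega)]; rfl

-- A's loop returns the first index p in [k, n) that passes the test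
lemma go_first (al bl : List Char) :
    ∀ (m : ℕ) (k n p : ℤ), n - k ≤ (m : ℤ) → k ≤ p → p < n →
    (PySem.List.slice al (some (-p)) none ++ PySem.List.slice al none (some (-p)) = bl) →
    (∀ i : ℤ, k ≤ i → i < p →
      PySem.List.slice al (some (-i)) none ++ PySem.List.slice al none (some (-i)) ≠ bl) →
    minShiftGo al bl (PySem.List.pyRange k n 1) = p := by
  intro m
  induction m with
  | zero => intro k n p hm hkp hpn _ _; omega
  | succ m ih =>
    intro k n p hm hkp hpn hp hmin
    have hkn : k < n := lt_of_le_of_lt hkp hpn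
    rw [PySem.List.pyRange_one_cons hkn]
    simp only [minShiftGo]
    by_cases hk : k = p
    · subst hk; rw [if_pos hp]
    · rw [if_neg (hmin k le_rfl (by omega))]
      exact ih (k+1) n p (by omega) (by omega) hpn hp (fun i h1 h2 => hmin i (by omega) h2)

lemma slice_neg_from (x : List Char) (i : ℕ) (h1 : 1 ≤ i) (h2 : i ≤ x.length) :
    PySem.List.slice x (some (-(i:ℤ))) none = x.drop (x.length - i) := by
  have hneg : (-(i:ℤ)) < 0 := by omega
  have hge : ¬ ((x.length:ℤ) + -(i:ℤ) < 0) := by omega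
  have ht : ((x.length:ℤ) + -(i:ℤ)).toNat = x.length - i := by omega
  simp only [PySem.List.slice, PySem.List.clampIdx, if_pos hneg, if_neg hge, ht]
  rw [List.take_of_length_le (by simp)]

lemma slice_neg_to (x : List Char) (i : ℕ) (h1 : 1 ≤ i) (h2 : i ≤ x.length) :
    PySem.List.slice x none (some (-(i:ℤ))) = x.take (x.length - i) := by
  have hneg : (-(i:ℤ)) < 0 := by omega
  have hge : ¬ ((x.length:ℤ) + -(i:ℤ) < 0) := by omega
  have ht : ((x.length:ℤ) + -(i:ℤ)).toNat = x.length - i := by omega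
  simp only [PySem.List.slice, PySem.List.clampIdx, if_pos hneg, if_neg hge, ht]
  simp

-- rotating by k and then by length-k gives the list back
lemma rot_rot (x : List Char) (k : ℕ) :
    (x.drop k ++ x.take k).drop (x.length - k) ++ (x.drop k ++ x.take k).take (x.length - k) = x := by
  have h : x.length - k = (x.drop k).length := by simp
  rw [h, List.drop_left, List.take_left, List.take_append_drop]

-- b is the right-rotation of a by p iff a is the right-rotation of b by n-p
lemma rot_iff (al bl : List Char) (p : ℕ) (hp : p ≤ bl.length) (hlen : al.length = bl.length) :
    bl = al.drop (al.length - p) ++ al.take (al.length - p) ↔ al = bl.drop p ++ bl.take p := by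
  constructor
  · intro h
    have h2 := rot_rot al (al.length - p)
    rw [← h] at h2
    have hpp : al.length - (al.length - p) = p := by omega
    rw [hpp] at h2
    exact h2.symm
  · intro h
    have h2 := rot_rot bl p
    rw [← h] at h2
    rw [hlen]
    exact h2.symm

-- A's test at shift p, in terms of a plain rotation of bl
lemma condA_iff (al bl : List Char) (p : ℕ) (hlen : bl.length = al.length)
    (h1 : 1 ≤ p) (h2 : p < al.length) :
    (PySem.List.slice al (some (-(p:ℤ))) none ++ PySem.List.slice al none (some (-(p:ℤ))) = bl)
    ↔ al = bl.drop p ++ bl.take p := by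
  rw [slice_neg_from al p h1 (le_of_lt h2), slice_neg_to al p h1 (le_of_lt h2), eq_comm]
  exact rot_iff al bl p (by omega) (by omega)

-- a occurs at offset p in b++b iff a is the rotation of b by p
lemma prefix_drop_iff (al bl : List Char) (p : ℕ) (hp : p ≤ bl.length)
    (hlen : al.length = bl.length) :
    al <+: (bl ++ bl).drop p ↔ al = bl.drop p ++ bl.take p := by
  rw [List.drop_append_of_le_length hp, List.prefix_iff_eq_take]
  have hT : (bl.drop p ++ bl).take al.length = bl.drop p ++ bl.take p := by
    rw [List.take_append, List.take_of_length_le (by simp; omega)]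
    congr 1
    congr 1
    simp
    omega
  rw [hT]

-- occurrence of al at offset q inside the cropped window (b+b)[1:2n-1]
lemma prefix_t_iff (al bl : List Char) (n : ℕ) (hb : bl.length = n) (ha : al.length = n)
    (hn : 1 ≤ n) (q : ℕ) :
    al <+: (List.drop 1 (List.take (2*n-1) (bl ++ bl))).drop q ↔
      (q + 1 < n ∧ al = bl.drop (q+1) ++ bl.take (q+1)) := by
  constructor
  · intro h
    rw [List.drop_drop, List.drop_take] at h
    rcases List.prefix_take_iff.mp h with ⟨hpre, hlen2⟩
    have hq : q + 1 < n := by omega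
    have e1 : q + 1 = 1 + q := by omega
    rw [← e1] at hpre
    exact ⟨hq, (prefix_drop_iff al bl (q+1) (by omega) (by omega)).mp hpre⟩
  · rintro ⟨hq, heq⟩
    rw [List.drop_drop, List.drop_take]
    apply List.prefix_take_iff.mpr
    have e1 : q + 1 = 1 + q := by omega
    constructor
    · rw [← e1]
      exact (prefix_drop_iff al bl (q+1) (by omega) (by omega)).mpr heq
    · omega

-- B's findFrom call, with bounds and clamps evaluated
lemma findFrom_eval (bl al : List Char) (n : ℕ) (hb : bl.length = n) (hn : 1 ≤ n) :
    PySem.Chars.findFrom (bl ++ bl) al 1 (some (2 * (n:ℤ) - 1)) =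
      (if PySem.Chars.find (List.drop 1 (List.take (2*n-1) (bl ++ bl))) al = -1 then -1
       else 1 + PySem.Chars.find (List.drop 1 (List.take (2*n-1) (bl ++ bl))) al) := by
  have hlen : ((bl ++ bl).length : ℤ) = 2*(n:ℤ) := by simp [hb]; omega
  simp only [PySem.Chars.findFrom, hlen]
  rw [if_neg (show ¬((2*(n:ℤ)) < 2*(n:ℤ)-1) by omega),
      if_neg (show ¬((2*(n:ℤ)-1) < 0) by omega),
      if_neg (show ¬((1:ℤ) < 0) by omega),
      if_neg (show ¬(2*(n:ℤ)-1 < 1) by omega),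
      show ((1:ℤ)).toNat = 1 from rfl,
      show ((2*(n:ℤ)-1)).toNat = 2*n-1 by omega]

-- the non-trivial case: equal lengths, n ≥ 1, a ≠ b
lemma main_case (al bl : List Char) (hlen : bl.length = al.length) (hn : 1 ≤ al.length) :
    minShiftGo al bl (PySem.List.pyRange 1 (al.length : ℤ) 1) =
    PySem.Chars.findFrom (bl ++ bl) al 1 (some (2 * (al.length : ℤ) - 1)) := by
  set n := al.length with hndef
  rw [findFrom_eval bl al n hlen hn]
  set t := List.drop 1 (List.take (2*n-1) (bl ++ bl)) with htdef
  by_cases hex : ∃ p : ℕ, 1 ≤ p ∧ p < n ∧ al = bl.drop p ++ bl.take p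
  · obtain ⟨hp1, hpn, hpeq⟩ := Nat.find_spec hex
    set p0 := Nat.find hex with hp0
    have hA : minShiftGo al bl (PySem.List.pyRange 1 (n:ℤ) 1) = (p0:ℤ) := by
      apply go_first al bl n 1 (n:ℤ) (p0:ℤ) (by omega) (by exact_mod_cast hp1) (by exact_mod_cast hpn)
      · exact (condA_iff al bl p0 hlen hp1 hpn).mpr hpeq
      · intro i hi1 hi2 hcond
        lift i to ℕ using (by omega) with j
        have hj1 : 1 ≤ j := by exact_mod_cast hi1
        have hj2 : j < p0 := by exact_mod_cast hi2
        have hrot := (condA_iff al bl j hlen hj1 (by omega)).mp hcond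
        have := Nat.find_min' hex ⟨hj1, by omega, hrot⟩
        omega
    have hpre : al <+: t.drop (p0 - 1) := by
      rw [htdef]
      have e1 : p0 - 1 + 1 = p0 := by omega
      apply (prefix_t_iff al bl n hlen hndef.symm hn (p0-1)).mpr
      rw [e1]
      exact ⟨hpn, hpeq⟩
    have hfin : PySem.Chars.find t al = ((p0 - 1 : ℕ) : ℤ) := by
      have hisin : PySem.Chars.isIn al t = true :=
        (PySem.Chars.exists_prefix_drop_iff_isIn al t).mp ⟨p0-1, hpre⟩
      have hf0 : 0 ≤ PySem.Chars.find t al :=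
        (PySem.Chars.find_nonneg_iff t al).mpr ((PySem.Chars.isIn_iff_infix al t).mp hisin)
      obtain ⟨hfp, hfmin⟩ := PySem.Chars.find_spec hf0
      have hge : ¬ ((PySem.Chars.find t al).toNat < p0 - 1) := by
        intro hlt
        obtain ⟨hq, heq⟩ := (prefix_t_iff al bl n hlen hndef.symm hn _).mp hfp
        have := Nat.find_min' hex ⟨by omega, hq, heq⟩
        omega
      have hle : ¬ (p0 - 1 < (PySem.Chars.find t al).toNat) := fun hlt => hfmin _ hlt hpre
      omega
    rw [hA, hfin, if_neg (by omega)]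
    omega
  · have hA : minShiftGo al bl (PySem.List.pyRange 1 (n:ℤ) 1) = -1 := by
      apply go_none al bl n 1 (n:ℤ) (by omega)
      intro i hi1 hi2 hcond
      lift i to ℕ using (by omega) with j
      have hj1 : 1 ≤ j := by exact_mod_cast hi1
      have hj2 : j < n := by exact_mod_cast hi2
      exact hex ⟨j, hj1, hj2, (condA_iff al bl j hlen hj1 hj2).mp hcond⟩
    have hB : PySem.Chars.find t al = -1 := by
      rw [PySem.Chars.find_eq_neg_one_iff]
      intro hinf
      obtain ⟨j, hj⟩ := (PySem.Chars.exists_prefix_drop_iff_isIn al t).mpr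
        ((PySem.Chars.isIn_iff_infix al t).mpr hinf)
      obtain ⟨hq, heq⟩ := (prefix_t_iff al bl n hlen hndef.symm hn j).mp hj
      exact hex ⟨j+1, by omega, hq, heq⟩
    rw [hA, hB, if_pos rfl]

theorem min_shift_eq (a b : String) : min_shift a b = min_shift_alt a b := by
  unfold min_shift min_shift_alt
  by_cases heq : a.toList = b.toList
  · rw [if_pos heq, if_pos heq]
  · rw [if_neg heq, if_neg heq]
    by_cases hbad : b.toList.length ≠ a.toList.length ∨ a.toList.length = 0
    · rw [if_pos hbad]
      apply go_none a.toList b.toList a.toList.length 1 (a.toList.length : ℤ) (by omega)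
      intro i hi1 hi2 hcond
      lift i to ℕ using (by omega) with j
      have hj1 : 1 ≤ j := by exact_mod_cast hi1
      have hj2 : j < a.toList.length := by exact_mod_cast hi2
      rw [slice_neg_from a.toList j hj1 hj2.le, slice_neg_to a.toList j hj1 hj2.le] at hcond
      have hl := congrArg List.length hcond
      simp only [List.length_append, List.length_drop, List.length_take] at hl
      rcases hbad with hb | hb
      · apply hb; omega
      · omega
    · rw [if_neg hbad]
      rcases not_or.mp hbad with ⟨h1, h2⟩
      exact main_case a.toList b.toList (not_not.mp (by simpa using h1)) (by omega)

-- ===== VERDICT (by name: the statement is the Claim_ definition above) =====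
theorem min_shift_spec : Claim_equal_min_shift := by
  intro a b _
  unfold Spec_min_shift
  exact min_shift_eq a b
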